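-- pv_equiv track=rewrite | github.com/mepuka/ontology-skill | ontologies/energy-news/scripts/mapping_qa_report.py | _find_issues
-- ===== SOURCE A (Python) =====
-- def _find_issues(rows: list[dict]) -> list[str]:
--     """Find potential issues in mapping rows."""
--     issues: list[str] = []
--
--     # Self-mappings
--     issues.extend(
--         f"Self-mapping: {r.get('subject_id')}"
--         for r in rows
--         if r.get("subject_id") == r.get("object_id")
--     )
--
--     # Duplicate mappings
--     seen: set[tuple[str | None, ...]] = set()
--     for r in rows:
--         key = (r.get("subject_id"), r.get("predicate_id"), r.get("object_id"))
--         if key in seen: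
--             issues.append(f"Duplicate: {key}")
--         seen.add(key)
--
--     # exactMatch transitivity check
--     exact_subjects = [
--         r.get("subject_id") for r in rows if r.get("predicate_id") == "skos:exactMatch"
--     ]
--     if len(exact_subjects) > 3:
--         issues.append(
--             f"Warning: {len(exact_subjects)} exactMatch mappings - check for transitive cliques"
--         )
--
--     return issues
-- ===== SOURCE B (Python) =====
-- def _find_issues(rows: list[dict]) -> list[str]:
--     """Single pass over rows maintaining three accumulators (simpler: one loop instead of three)."""
--     self_maps: list[str] = []
--     dups: list[str] = []
--     seen: set = set()
--     exact_count = 0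
--     for r in rows:
--         s = r.get("subject_id")
--         p = r.get("predicate_id")
--         o = r.get("object_id")
--         if s == o:
--             self_maps.append(f"Self-mapping: {s}")
--         key = (s, p, o)
--         if key in seen:
--             dups.append(f"Duplicate: {key}")
--         else:
--             seen.add(key)
--         if p == "skos:exactMatch":
--             exact_count += 1
--     issues = self_maps + dups
--     if exact_count > 3:
--         issues.append(
--             f"Warning: {exact_count} exactMatch mappings - check for transitive cliques"
--         )
--     return issues
-- ===== Notes on version B (the rewrite author's own statement) =====
-- stated objective: simpler
-- what changed: A's three separate passes over rows (a self-mapping comprehension, a duplicate-detection loop, and an exactMatch-counting comprehension plus len) are fused into one loop that maintains a self-mappings list, a seen-set with a duplicates list, and an exactMatch counter, concatenating the pieces at the end.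
import Mathlib
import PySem

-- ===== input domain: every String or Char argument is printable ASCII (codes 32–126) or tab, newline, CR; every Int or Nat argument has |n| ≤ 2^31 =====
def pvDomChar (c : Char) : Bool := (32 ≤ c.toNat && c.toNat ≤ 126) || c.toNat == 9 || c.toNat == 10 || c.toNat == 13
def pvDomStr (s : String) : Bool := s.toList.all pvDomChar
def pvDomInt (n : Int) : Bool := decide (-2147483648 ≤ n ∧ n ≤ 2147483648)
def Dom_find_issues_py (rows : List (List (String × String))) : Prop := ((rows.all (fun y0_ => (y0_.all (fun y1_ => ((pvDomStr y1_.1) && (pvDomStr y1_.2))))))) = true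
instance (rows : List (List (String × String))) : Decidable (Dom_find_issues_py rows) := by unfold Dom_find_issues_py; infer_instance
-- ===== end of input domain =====

-- B is a single pass over the rows with three accumulators instead of A's three separate passes
-- (objective: simpler/one-pass; same return value, no side effects involved).

-- shared helpers: Python semantics of dict.get and of f-string / repr formatting on the ASCII domain
-- r.get(k): first match in the association list, None if absent
def dget (r : List (String × String)) (k : String) : Option String :=
  match r.find? (fun p => p.1 == k) with
  | some p => some p.2
  | none => none

-- str(x) for x : Optional[str]
def pyStrOpt : Option String → String
  | none => "None"
  | some s => s

-- one character of repr(s): exact for printable ASCII plus tab/newline/CR (the stated domain)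
def escChar (q c : Char) : List Char :=
  if c = '\\' then ['\\', '\\']
  else if c = q then ['\\', q]
  else if c = '\t' then ['\\', 't']
  else if c = '\n' then ['\\', 'n']
  else if c = '\r' then ['\\', 'r']
  else [c]

-- repr(s): Python's quote choice and escapes, exact on the stated ASCII domain
def pyRepr (s : String) : String :=
  let cs := s.toList
  let q := if cs.contains '\'' && !cs.contains '"' then '"' else '\''
  String.ofList (q :: cs.flatMap (escChar q) ++ [q])

def pyReprOpt : Option String → String
  | none => "None"
  | some s => pyRepr s

abbrev MKey := Option String × Option String × Option String

-- repr of the 3-tuple key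
def keyRepr (k : MKey) : String :=
  "(" ++ pyReprOpt k.1 ++ ", " ++ pyReprOpt k.2.1 ++ ", " ++ pyReprOpt k.2.2 ++ ")"

def selfMsg (s : Option String) : String := "Self-mapping: " ++ pyStrOpt s
def dupMsg (k : MKey) : String := "Duplicate: " ++ keyRepr k
def warnMsg (n : Int) : String :=
  "Warning: " ++ PySem.Int.toStr n ++ " exactMatch mappings - check for transitive cliques"

-- ===== PORT A =====
def find_issues_py (rows : List (List (String × String))) : List String :=
  -- issues.extend(... for r in rows if r.get("subject_id") == r.get("object_id"))
  let issues : List String := rows.foldl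
    (fun acc r =>
      if dget r "subject_id" == dget r "object_id"
      then acc ++ [selfMsg (dget r "subject_id")] else acc) []
  -- second loop: duplicates, threading (issues, seen)
  let st := rows.foldl
    (fun (st : List String × PySem.Set MKey) r =>
      let key : MKey := (dget r "subject_id", dget r "predicate_id", dget r "object_id")
      (if PySem.Set.contains st.2 key then st.1 ++ [dupMsg key] else st.1,
       PySem.Set.add st.2 key))
    (issues, PySem.Set.empty)
  -- exact_subjects comprehension + threshold
  let exact_subjects :=
    (rows.filter (fun r => dget r "predicate_id" == some "skos:exactMatch")).map
      (fun r => dget r "subject_id")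
  if 3 < exact_subjects.length then st.1 ++ [warnMsg (exact_subjects.length : Int)] else st.1

-- ===== PORT B =====
def find_issues_py_alt (rows : List (List (String × String))) : List String :=
  -- one loop, state (self_maps, seen, dups, exact_count)
  let st := rows.foldl
    (fun (st : List String × PySem.Set MKey × List String × Int) r =>
      let s := dget r "subject_id"
      let p := dget r "predicate_id"
      let o := dget r "object_id"
      let self_maps := if s == o then st.1 ++ [selfMsg s] else st.1
      let key : MKey := (s, p, o)
      let sd : PySem.Set MKey × List String :=
        if PySem.Set.contains st.2.1 key then (st.2.1, st.2.2.1 ++ [dupMsg key])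
        else (PySem.Set.add st.2.1 key, st.2.2.1)
      let c := if p == some "skos:exactMatch" then st.2.2.2 + 1 else st.2.2.2
      (self_maps, sd.1, sd.2, c))
    ([], PySem.Set.empty, [], 0)
  let issues := st.1 ++ st.2.2.1
  if 3 < st.2.2.2 then issues ++ [warnMsg st.2.2.2] else issues

-- ===== PRECONDITION & SPEC =====
def Spec_find_issues_py (rows : List (List (String × String))) (out : List String) : Prop := out = find_issues_py_alt rows
instance (rows : List (List (String × String))) (out : List String) : Decidable (Spec_find_issues_py rows out) := by unfold Spec_find_issues_py; infer_instance

-- ===== CLAIM (what is proved, stated in full; the proofs are below) =====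
def Claim_equal_find_issues_py : Prop := ∀ (rows : List (List (String × String))), Dom_find_issues_py rows → Spec_find_issues_py rows (find_issues_py rows)
-- ===== LEMMAS AND PROOFS =====

-- named forms of the two programs' loop bodies (definitionally equal to the ports' lambdas)
def astep1 (acc : List String) (r : List (String × String)) : List String :=
  if dget r "subject_id" == dget r "object_id"
  then acc ++ [selfMsg (dget r "subject_id")] else acc

def dstep (st : List String × PySem.Set MKey) (r : List (String × String)) :
    List String × PySem.Set MKey :=
  let key : MKey := (dget r "subject_id", dget r "predicate_id", dget r "object_id")
  (if PySem.Set.contains st.2 key then st.1 ++ [dupMsg key] else st.1,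
   PySem.Set.add st.2 key)

def bstep (st : List String × PySem.Set MKey × List String × Int)
    (r : List (String × String)) : List String × PySem.Set MKey × List String × Int :=
  let s := dget r "subject_id"
  let p := dget r "predicate_id"
  let o := dget r "object_id"
  let self_maps := if s == o then st.1 ++ [selfMsg s] else st.1
  let key : MKey := (s, p, o)
  let sd : PySem.Set MKey × List String :=
    if PySem.Set.contains st.2.1 key then (st.2.1, st.2.2.1 ++ [dupMsg key])
    else (PySem.Set.add st.2.1 key, st.2.2.1)
  let c := if p == some "skos:exactMatch" then st.2.2.2 + 1 else st.2.2.2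
  (self_maps, sd.1, sd.2, c)

-- A's second loop with initial issue list ds is ds ++ (the loop started from [])
lemma dup_shift (t : List (List (String × String))) :
    ∀ (ds : List String) (seen : PySem.Set MKey),
      List.foldl dstep (ds, seen) t
        = (ds ++ (List.foldl dstep ([], seen) t).1, (List.foldl dstep ([], seen) t).2) := by
  induction t with
  | nil => intro ds seen; simp
  | cons r t ih =>
      intro ds seen
      simp only [List.foldl_cons, dstep]
      by_cases h : PySem.Set.contains seen (dget r "subject_id", dget r "predicate_id", dget r "object_id")
      · simp only [h, if_true, List.nil_append]
        rw [ih, ih [dupMsg (dget r "subject_id", dget r "predicate_id", dget r "object_id")]]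
        simp
      · simp only [h, if_false, Bool.false_eq_true]
        rw [ih]

lemma alt_fold (t : List (List (String × String))) :
    ∀ (ss : List String) (seen : PySem.Set MKey) (ds : List String) (c : Int),
      List.foldl bstep (ss, seen, ds, c) t
        = (List.foldl astep1 ss t,
           (List.foldl dstep (ds, seen) t).2,
           (List.foldl dstep (ds, seen) t).1,
           c + ((t.filter (fun r => dget r "predicate_id" == some "skos:exactMatch")).length : Int)) := by
  induction t with
  | nil => intro ss seen ds c; simp
  | cons r t ih =>
      intro ss seen ds c
      simp only [List.foldl_cons, List.filter_cons, bstep, astep1, dstep]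
      rw [ih]
      by_cases h : (dget r "subject_id", dget r "predicate_id", dget r "object_id") ∈ seen
      · by_cases hp : (dget r "predicate_id" == some "skos:exactMatch") = true
        · simp [h, hp, PySem.Set.add, PySem.Set.contains]; omega
        · simp [h, hp, PySem.Set.add, PySem.Set.contains]
      · by_cases hp : (dget r "predicate_id" == some "skos:exactMatch") = true
        · simp [h, hp, PySem.Set.add, PySem.Set.contains]; omega
        · simp [h, hp, PySem.Set.add, PySem.Set.contains]

-- ===== VERDICT =====
theorem find_issues_py_spec : Claim_equal_find_issues_py := by
  intro rows _
  unfold Spec_find_issues_py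
  have hA : find_issues_py rows =
      (if 3 < ((rows.filter (fun r => dget r "predicate_id" == some "skos:exactMatch")).map
                 (fun r => dget r "subject_id")).length
       then (List.foldl dstep (List.foldl astep1 [] rows, PySem.Set.empty) rows).1
              ++ [warnMsg (((rows.filter (fun r => dget r "predicate_id" == some "skos:exactMatch")).map
                   (fun r => dget r "subject_id")).length : Int)]
       else (List.foldl dstep (List.foldl astep1 [] rows, PySem.Set.empty) rows).1) := rfl
  have hB : find_issues_py_alt rows =
      (if 3 < (List.foldl bstep ([], PySem.Set.empty, [], 0) rows).2.2.2
       then ((List.foldl bstep ([], PySem.Set.empty, [], 0) rows).1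
              ++ (List.foldl bstep ([], PySem.Set.empty, [], 0) rows).2.2.1)
              ++ [warnMsg (List.foldl bstep ([], PySem.Set.empty, [], 0) rows).2.2.2]
       else (List.foldl bstep ([], PySem.Set.empty, [], 0) rows).1
              ++ (List.foldl bstep ([], PySem.Set.empty, [], 0) rows).2.2.1) := rfl
  rw [hA, hB, alt_fold, dup_shift]
  simp only [List.length_map, zero_add]
  set n := (rows.filter (fun r => dget r "predicate_id" == some "skos:exactMatch")).length with hn
  by_cases h : 3 < n
  · rw [if_pos h, if_pos (by exact_mod_cast h : (3:Int) < (n:Int))]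
  · rw [if_neg h, if_neg (by exact_mod_cast h : ¬ (3:Int) < (n:Int))]
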